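-- pv_equiv track=rewrite | github.com/rsemihkoca/Leetcode-Solutions | FacebookQuestions/Encrypted Words.py | findEncryptedWord
-- ===== SOURCE A (Python) =====
-- def findEncryptedWord(s):
--   # Write your code here
--
--
--   if len(s) <= 2:
--     return "".join(s)
--   result = ""
--
--   index_of_middle = find_middle(s)
--
--   left_side = s[:index_of_middle]
--
--   right_side = s[index_of_middle+1:]
--
--
--   result += s[index_of_middle] + findEncryptedWord(left_side) + findEncryptedWord(right_side)
--   return result
--
-- def find_middle(li:list) -> int:
--
--
--   left = 0
--   right = len(li)-1
--
--   mid = (left + right) // 2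
--
--   return mid
-- ===== SOURCE B (Python) =====
-- def findEncryptedWord(s):
--     result = []
--     stack = [(0, len(s))]
--     while stack:
--         lo, hi = stack.pop()
--         n = hi - lo
--         if n == 0:
--             continue
--         if n <= 2:
--             result.extend(s[lo:hi])
--         else:
--             mid = lo + (n - 1) // 2
--             result.append(s[mid])
--             stack.append((mid + 1, hi))
--             stack.append((lo, mid))
--     return "".join(result)
-- ===== Notes on version B (the rewrite author's own statement) =====
-- stated objective: alternative
-- what changed: Replaced the recursive midpoint-split (building fresh substrings at every call) with an iterative loop over an explicit stack of (lo,hi) index ranges into the original string, appending characters to one result list.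
import Mathlib
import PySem

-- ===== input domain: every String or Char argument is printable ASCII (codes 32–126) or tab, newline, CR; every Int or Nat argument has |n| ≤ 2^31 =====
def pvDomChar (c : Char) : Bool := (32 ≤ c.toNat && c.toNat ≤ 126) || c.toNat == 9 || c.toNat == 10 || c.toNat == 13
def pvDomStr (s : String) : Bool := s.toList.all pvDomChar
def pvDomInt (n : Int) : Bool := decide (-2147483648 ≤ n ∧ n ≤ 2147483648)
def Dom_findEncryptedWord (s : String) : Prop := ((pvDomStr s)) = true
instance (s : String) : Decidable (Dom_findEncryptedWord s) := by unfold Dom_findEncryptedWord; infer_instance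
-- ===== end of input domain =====

-- B replaces A's recursion (with substring copies) by one loop over an explicit stack of index ranges; equal return value proved.

-- ===== PORT A =====
-- recursive midpoint split, working on the character list of the string
def findEncryptedWordCore (cs : List Char) : List Char :=
  if _h : cs.length ≤ 2 then cs
  else
    let mid := PySem.Int.floordiv (0 + ((cs.length : Int) - 1)) 2   -- find_middle
    let left := PySem.List.slice cs none (some mid)                  -- s[:mid]
    let right := PySem.List.slice cs (some (mid + 1)) none           -- s[mid+1:]
    PySem.List.pyGetD cs mid default ::                              -- s[mid] (always in range)
      (findEncryptedWordCore left ++ findEncryptedWordCore right)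
  termination_by cs.length
  decreasing_by
  · -- left is strictly shorter
    have hm : PySem.Int.floordiv (0 + ((cs.length : Int) - 1)) 2 = ((cs.length - 1) / 2 : Int) := by
      rw [PySem.Int.floordiv_eq_ediv_of_pos (by omega)]; ring_nf
    simp only [hm, PySem.List.slice_to cs (by omega : (0:Int) ≤ ((cs.length:Int) - 1) / 2), List.length_take]
    omega
  · -- right is strictly shorter
    have hm : PySem.Int.floordiv (0 + ((cs.length : Int) - 1)) 2 = ((cs.length - 1) / 2 : Int) := by
      rw [PySem.Int.floordiv_eq_ediv_of_pos (by omega)]; ring_nf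
    simp only [hm, PySem.List.slice_from cs (by omega : (0:Int) ≤ ((cs.length:Int) - 1) / 2 + 1), List.length_drop]
    omega

def findEncryptedWord (s : String) : String :=
  String.ofList (findEncryptedWordCore s.toList)

-- ===== PORT B =====
-- iterative loop: pop a range, emit its middle char, push right then left range
def findEncryptedWordLoop (cs : List Char) : List (Nat × Nat) → List Char → List Char
  | [], acc => acc
  | (lo, hi) :: rest, acc =>
    let n := hi - lo
    if n = 0 then findEncryptedWordLoop cs rest acc
    else if n ≤ 2 then
      findEncryptedWordLoop cs rest (acc ++ (cs.drop lo).take n)     -- s[lo:hi]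
    else
      let mid := lo + (n - 1) / 2
      findEncryptedWordLoop cs ((lo, mid) :: (mid + 1, hi) :: rest)
        (acc ++ [cs.getD mid default])                               -- append s[mid]
  termination_by st _ => 2 * (st.map (fun p => p.2 - p.1)).sum + st.length
  decreasing_by all_goals simp_all [List.map_cons]; omega

def findEncryptedWord_alt (s : String) : String :=
  String.ofList (findEncryptedWordLoop s.toList [(0, s.toList.length)] [])

-- ===== PRECONDITION & SPEC =====
def Spec_findEncryptedWord (s : String) (out : String) : Prop := out = findEncryptedWord_alt s
instance (s : String) (out : String) : Decidable (Spec_findEncryptedWord s out) := by unfold Spec_findEncryptedWord; infer_instance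

-- ===== CLAIM (what is proved, stated in full; the proofs are below) =====
def Claim_equal_findEncryptedWord : Prop := ∀ (s : String), Dom_findEncryptedWord s → Spec_findEncryptedWord s (findEncryptedWord s)

-- ===== LEMMAS AND PROOFS =====

-- proof-side reference function: the midpoint-split emission in drop/take form
def encSpec (cs : List Char) : List Char :=
  if _h : cs.length ≤ 2 then cs
  else
    let m := (cs.length - 1) / 2
    cs.getD m default :: (encSpec (cs.take m) ++ encSpec (cs.drop (m + 1)))
  termination_by cs.length
  decreasing_by
  · simp only [List.length_take]; omega
  · simp only [List.length_drop]; omega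

theorem encA_eq_encSpec (cs : List Char) : findEncryptedWordCore cs = encSpec cs := by
  generalize hn : cs.length = n
  induction n using Nat.strong_induction_on generalizing cs with
  | _ n ih =>
    subst hn
    rw [findEncryptedWordCore, encSpec]
    by_cases hl : cs.length ≤ 2
    · simp [hl]
    · have h3 : 3 ≤ cs.length := by omega
      have hm : PySem.Int.floordiv (0 + ((cs.length : Int) - 1)) 2
          = (((cs.length - 1) / 2 : Nat) : Int) := by
        rw [PySem.Int.floordiv_eq_ediv_of_pos (by omega)]
        omega
      have hsl : PySem.List.slice cs none (some (((cs.length - 1) / 2 : Nat) : Int))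
          = cs.take ((((cs.length - 1) / 2 : Nat) : Int)).toNat := PySem.List.slice_to cs (by omega)
      have hsr : PySem.List.slice cs (some ((((cs.length - 1) / 2 : Nat) : Int) + 1)) none
          = cs.drop (((((cs.length - 1) / 2 : Nat) : Int)) + 1).toNat :=
        PySem.List.slice_from cs (by omega)
      have ht : ((((cs.length - 1) / 2 : Nat) : Int)).toNat = (cs.length - 1) / 2 := by omega
      have ht1 : (((((cs.length - 1) / 2 : Nat) : Int)) + 1).toNat = (cs.length - 1) / 2 + 1 := by
        omega
      simp only [hl, dif_neg, not_false_iff, hm, hsl, hsr, ht, ht1, PySem.List.pyGetD_natCast]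
      rw [ih _ (by simp only [List.length_take]; omega) _ rfl,
        ih _ (by simp only [List.length_drop]; omega) _ rfl]

theorem encB_seg (cs : List Char) : ∀ (n lo hi : Nat), hi - lo = n → hi ≤ cs.length →
    ∀ rest acc, findEncryptedWordLoop cs ((lo, hi) :: rest) acc
      = findEncryptedWordLoop cs rest (acc ++ encSpec ((cs.drop lo).take (hi - lo))) := by
  intro n
  induction n using Nat.strong_induction_on with
  | _ n ih =>
    intro lo hi hn hhi rest acc
    subst hn
    rw [findEncryptedWordLoop]
    by_cases h0 : hi - lo = 0
    · rw [if_pos h0, h0]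
      simp [encSpec]
    · by_cases h2 : hi - lo ≤ 2
      · have hle : ((cs.drop lo).take (hi - lo)).length ≤ 2 := by
          simp only [List.length_take, List.length_drop]; omega
        have hseg : encSpec ((cs.drop lo).take (hi - lo)) = (cs.drop lo).take (hi - lo) := by
          rw [encSpec, dif_pos hle]
        rw [if_neg h0, if_pos h2, hseg]
      · have h3 : 3 ≤ hi - lo := by omega
        have hlen : ((cs.drop lo).take (hi - lo)).length = hi - lo := by
          simp only [List.length_take, List.length_drop]; omega
        set m := (hi - lo - 1) / 2 with hmdef
        rw [if_neg h0, if_neg h2]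
        rw [ih m (by omega) lo (lo + m) (by omega) (by omega),
            ih (hi - (lo + m + 1)) (by omega) (lo + m + 1) hi (by omega) hhi]
        congr 1
        have hnb : ¬ ((cs.drop lo).take (hi - lo)).length ≤ 2 := by omega
        conv_rhs => rw [encSpec, dif_neg hnb]
        simp only [hlen, ← hmdef]
        have hgd : cs.getD (lo + m) default
            = ((cs.drop lo).take (hi - lo)).getD m default := by
          simp only [List.getD_eq_getElem?_getD,
            List.getElem?_take_of_lt (show m < hi - lo by omega), List.getElem?_drop]
        have htake : ((cs.drop lo).take (hi - lo)).take m = (cs.drop lo).take ((lo + m) - lo) := by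
          rw [List.take_take]
          congr 1
          omega
        have hdrop : ((cs.drop lo).take (hi - lo)).drop (m + 1)
            = (cs.drop (lo + m + 1)).take (hi - (lo + m + 1)) := by
          rw [List.drop_take, List.drop_drop]
          have e1 : hi - lo - (m + 1) = hi - (lo + m + 1) := by omega
          have e2 : lo + (m + 1) = lo + m + 1 := by omega
          have e3 : m + 1 + lo = lo + m + 1 := by omega
          try rw [e1]
          try rw [e2]
          try rw [e3]
        rw [hgd, htake, hdrop, List.append_assoc]
        simp

-- ===== VERDICT (by name: the statement is the Claim_ definition above) =====
theorem findEncryptedWord_spec : Claim_equal_findEncryptedWord := by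
  intro s _
  unfold Spec_findEncryptedWord findEncryptedWord findEncryptedWord_alt
  rw [encA_eq_encSpec, encB_seg s.toList (s.toList.length - 0) 0 s.toList.length rfl (le_refl _) [] []]
  rw [findEncryptedWordLoop]
  simp only [Nat.sub_zero, List.drop_zero, List.nil_append]
  rw [List.take_length]
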